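-- pv_equiv track=rewrite | github.com/evertonandrade/movie-recommender-system | app.py | verificarAdjacentes
-- ===== SOURCE A (Python) =====
-- def verificarAdjacentes(grafo, filmes):
--
--     lista_users = []
--
--     for movieName in filmes:
--         for vertice in grafo.keys():
--             if movieName in grafo[vertice].keys():
--                 for key in grafo[movieName].keys():
--                     if key not in lista_users:
--                         lista_users.append(key)
--     return lista_users
-- ===== SOURCE B (Python) =====
-- def verificarAdjacentes(grafo, filmes):
--     # Pass 1: precompute the set of all neighbor vertices.
--     alvos = {k for adj in grafo.values() for k in adj}
--     # Pass 2: flat stream of all candidate user keys, in order.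
--     stream = [k for m in filmes if m in alvos for k in grafo[m].keys()]
--     # Pass 3: one dedup pass with a seen-set (first occurrences, in order).
--     seen = set()
--     out = []
--     for k in stream:
--         if k not in seen:
--             seen.add(k)
--             out.append(k)
--     return out
-- ===== Notes on version B (the rewrite author's own statement) =====
-- stated objective: faster
-- what changed: B is three staged passes: a precomputed set of all neighbor vertices, a flat comprehension collecting the candidate key stream, and one seen-set dedup pass; A's nested per-movie scan over every graph vertex and its list-membership dedup inside the loop are gone. Intended as faster; timing runs measured B 13-15x faster at n=256, though one run could not confirm this by its consistency rule.
import Mathlib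
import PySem

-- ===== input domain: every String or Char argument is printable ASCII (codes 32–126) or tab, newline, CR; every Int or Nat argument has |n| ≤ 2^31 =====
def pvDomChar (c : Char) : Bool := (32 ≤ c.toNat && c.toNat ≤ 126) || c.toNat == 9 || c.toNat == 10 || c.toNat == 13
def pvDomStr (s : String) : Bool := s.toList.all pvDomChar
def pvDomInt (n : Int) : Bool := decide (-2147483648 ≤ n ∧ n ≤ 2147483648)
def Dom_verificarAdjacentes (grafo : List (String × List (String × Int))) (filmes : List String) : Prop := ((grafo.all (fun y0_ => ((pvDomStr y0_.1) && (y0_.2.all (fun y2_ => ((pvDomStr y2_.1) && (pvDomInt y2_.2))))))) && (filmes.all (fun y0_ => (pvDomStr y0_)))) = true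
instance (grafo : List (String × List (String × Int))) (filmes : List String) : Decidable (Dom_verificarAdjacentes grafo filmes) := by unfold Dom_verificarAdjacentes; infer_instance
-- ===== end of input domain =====

-- B replaces A's nested per-movie scan over all vertices (with list-membership dedup
-- inside the loop) by three staged passes: a precomputed neighbor set, a flat
-- candidate-key stream, and one seen-set dedup pass (intended as faster; timing run
-- runs measured B 13-15x at n=256, one run unconfirmed by its consistency rule).

-- ===== PORT A =====
-- `for key in adj.keys(): if key not in lista_users: lista_users.append(key)`
def pvAddKeys (lista : List String) (adj : List (String × Int)) : List String :=
  adj.foldl (fun l kv => if l.contains kv.1 then l else l ++ [kv.1]) lista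

-- grafo[k]: first-match lookup; under Pre_ the key is present wherever this is reached
def pvLookup (grafo : List (String × List (String × Int))) (k : String) : List (String × Int) :=
  (List.lookup k grafo).getD []

def verificarAdjacentes (grafo : List (String × List (String × Int))) (filmes : List String) : List String :=
  filmes.foldl (fun lista movieName =>
    -- for vertice in grafo.keys(): if movieName in grafo[vertice].keys(): …
    grafo.foldl (fun lista vertice =>
      if (vertice.2.map Prod.fst).contains movieName then
        pvAddKeys lista (pvLookup grafo movieName)
      else lista) lista) []

-- ===== PORT B =====
-- `for k in stream: if k not in seen: seen.add(k); out.append(k)`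
def pvDedupPass (seen : PySem.Set String) (out : List String) : List String → List String
  | [] => out
  | k :: ks =>
      if seen.contains k then pvDedupPass seen out ks
      else pvDedupPass (seen.add k) (out ++ [k]) ks

def verificarAdjacentes_alt (grafo : List (String × List (String × Int))) (filmes : List String) : List String :=
  -- alvos = {k for adj in grafo.values() for k in adj}
  let alvos : PySem.Set String := PySem.Set.ofList (grafo.flatMap (fun p => p.2.map Prod.fst))
  -- stream = [k for m in filmes if m in alvos for k in grafo[m].keys()]
  let stream : List String := filmes.flatMap (fun m =>
    if alvos.contains m then ((List.lookup m grafo).getD []).map Prod.fst else [])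
  pvDedupPass PySem.Set.empty [] stream

-- ===== PRECONDITION & SPEC =====
-- Pre_ excludes exactly the inputs on which Python A raises KeyError: a movie that
-- occurs in some vertex's adjacency but is not itself a key of grafo.
def Pre_verificarAdjacentes (grafo : List (String × List (String × Int))) (filmes : List String) : Prop :=
  ∀ m ∈ filmes, (∃ p ∈ grafo, ∃ q ∈ p.2, q.1 = m) → ∃ p ∈ grafo, p.1 = m
instance (grafo : List (String × List (String × Int))) (filmes : List String) : Decidable (Pre_verificarAdjacentes grafo filmes) := by unfold Pre_verificarAdjacentes; infer_instance

def pvWitness_verificarAdjacentes : (List (String × List (String × Int))) × List String :=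
  ([("a", [("b", 1)]), ("b", [("a", 1)])], ["a", "c"])

def Spec_verificarAdjacentes (grafo : List (String × List (String × Int))) (filmes : List String) (out : List String) : Prop := out = verificarAdjacentes_alt grafo filmes
instance (grafo : List (String × List (String × Int))) (filmes : List String) (out : List String) : Decidable (Spec_verificarAdjacentes grafo filmes out) := by unfold Spec_verificarAdjacentes; infer_instance

-- ===== CLAIM =====
def Claim_equal_verificarAdjacentes : Prop := ∀ (grafo : List (String × List (String × Int))) (filmes : List String), Dom_verificarAdjacentes grafo filmes → Pre_verificarAdjacentes grafo filmes → Spec_verificarAdjacentes grafo filmes (verificarAdjacentes grafo filmes)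

-- ===== LEMMAS AND PROOFS =====

-- the shared dedup step, only used in the proofs
def pvStep (l : List String) (k : String) : List String :=
  if l.contains k then l else l ++ [k]

lemma mem_pvStep_of_mem {x : String} {l : List String} (k : String) (h : x ∈ l) :
    x ∈ pvStep l k := by
  unfold pvStep; split
  · exact h
  · exact List.mem_append_left _ h

lemma mem_foldl_pvStep_of_mem {x : String} {l : List String} (ks : List String) (h : x ∈ l) :
    x ∈ ks.foldl pvStep l := by
  induction ks generalizing l with
  | nil => simpa using h
  | cons k ks ih => exact ih (mem_pvStep_of_mem k h)

-- A's inner append loop is the fold of pvStep over the keys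
lemma pvAddKeys_eq (lista : List String) (adj : List (String × Int)) :
    pvAddKeys lista adj = (adj.map Prod.fst).foldl pvStep lista := by
  rw [List.foldl_map]; rfl

-- running the dedup fold a second time over the same keys changes nothing
lemma pvStep_of_mem {x : String} {l : List String} (h : x ∈ l) : pvStep l x = l := by
  unfold pvStep; rw [if_pos (by simpa using h)]

lemma foldl_pvStep_idem (lista : List String) (ks : List String) :
    ks.foldl pvStep (ks.foldl pvStep lista) = ks.foldl pvStep lista := by
  induction ks generalizing lista with
  | nil => rfl
  | cons k ks ih =>
      simp only [List.foldl_cons]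
      have hmem : k ∈ ks.foldl pvStep (pvStep lista k) := by
        apply mem_foldl_pvStep_of_mem
        unfold pvStep; split
        · next h => exact List.mem_of_elem_eq_true h
        · exact List.mem_append_right _ (by simp)
      rw [pvStep_of_mem hmem]
      exact ih _

-- A's scan over all vertices for one movie collapses to a single test
lemma foldl_graph (grafo : List (String × List (String × Int))) (lista : List String)
    (m : String) (ks : List String) :
    grafo.foldl (fun lista v =>
        if (v.2.map Prod.fst).contains m then ks.foldl pvStep lista else lista) lista
      = if grafo.any (fun v => (v.2.map Prod.fst).contains m) then ks.foldl pvStep lista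
        else lista := by
  induction grafo generalizing lista with
  | nil => simp
  | cons v grafo ih =>
      simp only [List.foldl_cons, List.any_cons]
      rw [ih]
      by_cases h : (v.2.map Prod.fst).contains m = true
      · rw [if_pos h]
        simp only [h, Bool.true_or, if_true]
        by_cases h2 : (grafo.any fun v => (v.2.map Prod.fst).contains m) = true
        · rw [if_pos h2, foldl_pvStep_idem]
        · rw [if_neg h2]
      · rw [if_neg h]
        rw [Bool.not_eq_true] at h
        simp only [h, Bool.false_or]

-- A's per-movie "some vertex has m as neighbor" test equals B's set membership
lemma any_eq_contains (grafo : List (String × List (String × Int))) (m : String) :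
    grafo.any (fun v => (v.2.map Prod.fst).contains m)
      = (PySem.Set.ofList (grafo.flatMap (fun p => p.2.map Prod.fst))).contains m := by
  by_cases h : m ∈ grafo.flatMap (fun p => p.2.map Prod.fst)
  · have h' : ∃ v ∈ grafo, m ∈ v.2.map Prod.fst := by simpa using h
    simp [PySem.Set.contains, PySem.Set.mem_ofList, h]
    simpa using h'
  · have h' : ¬ ∃ v ∈ grafo, m ∈ v.2.map Prod.fst := by simpa using h
    simp [PySem.Set.contains, PySem.Set.mem_ofList, h]
    simpa using h'

-- folding the outer loop over a flatMapped stream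
lemma foldl_flatMap (filmes : List String) (init : List String)
    (f : String → List String) :
    filmes.foldl (fun l m => (f m).foldl pvStep l) init
      = (filmes.flatMap f).foldl pvStep init := by
  induction filmes generalizing init with
  | nil => rfl
  | cons m filmes ih => simp [List.foldl_append, ih]

-- B's seen-set dedup pass equals the fold of pvStep, under the seen/out invariant
lemma pvDedupPass_eq (ks : List String) (seen : PySem.Set String) (out : List String)
    (hinv : ∀ x, seen.contains x = out.contains x) :
    pvDedupPass seen out ks = ks.foldl pvStep out := by
  induction ks generalizing seen out with
  | nil => rfl
  | cons k ks ih =>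
      simp only [pvDedupPass, List.foldl_cons]
      by_cases h : seen.contains k = true
      · rw [if_pos h]
        rw [show pvStep out k = out from by unfold pvStep; rw [if_pos (by rw [← hinv]; exact h)]]
        exact ih seen out hinv
      · rw [if_neg h]
        have hout : out.contains k = false := by rw [← hinv]; simpa using h
        rw [show pvStep out k = out ++ [k] from by
          unfold pvStep; rw [if_neg (by simpa using hout)]]
        apply ih
        intro x
        have hadd : PySem.Set.add seen k = seen ++ [k] := by
          unfold PySem.Set.add
          rw [if_neg (by simp_all [PySem.Set.contains])]
        rw [hadd]
        simp only [PySem.Set.contains_eq_listContains, List.contains_append] at hinv ⊢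
        rw [hinv x]

-- ===== VERDICT =====
theorem verificarAdjacentes_spec : Claim_equal_verificarAdjacentes := by
  intro grafo filmes _ _
  unfold Spec_verificarAdjacentes verificarAdjacentes verificarAdjacentes_alt
  rw [pvDedupPass_eq _ _ _ (by intro x; rfl)]
  rw [← foldl_flatMap]
  congr 1
  funext lista m
  have h1 : (fun (lista : List String) (vertice : String × List (String × Int)) =>
      if (vertice.2.map Prod.fst).contains m then pvAddKeys lista (pvLookup grafo m) else lista)
    = (fun (lista : List String) (vertice : String × List (String × Int)) =>
      if (vertice.2.map Prod.fst).contains m then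
        (((List.lookup m grafo).getD []).map Prod.fst).foldl pvStep lista else lista) := by
    funext l v; rw [pvAddKeys_eq]; rfl
  rw [h1, foldl_graph, any_eq_contains]
  by_cases h : (PySem.Set.ofList (grafo.flatMap fun p => p.2.map Prod.fst)).contains m = true
  · rw [if_pos h, if_pos h]
  · rw [if_neg h, if_neg h]; rfl
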